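-- pv_equiv track=rewrite | github.com/asweigart/inventwithpython3rded | translations/es/src/panecillos.py | obtenerPistas
-- ===== SOURCE A (Python) =====
-- def obtenerPistas(conjetura, numSecreto):
--     # Devuelve una palabra con las pistas Panecillos Pico y Fermi en ella.
--     if conjetura == numSecreto:
--         return '¡Lo has adivinado!'
--
--     pista = []
--
--     for i in range(len(conjetura)):
--         if conjetura[i] == numSecreto[i]:
--             pista.append('Fermi')
--         elif conjetura[i] in numSecreto:
--             pista.append('Pico')
--     if len(pista) == 0:
--         return 'Panecillos'
--
--     pista.sort()
--     return ' '.join(pista)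
-- ===== SOURCE B (Python) =====
-- def obtenerPistas(conjetura, numSecreto):
--     # Pairwise decomposition: fermi from zip-equality, pico derived
--     # arithmetically as (#digits present in secret) - fermi; no per-index
--     # branch chain, no list building, no sort.
--     if conjetura == numSecreto:
--         return '¡Lo has adivinado!'
--
--     fermi = sum(a == b for a, b in zip(conjetura, numSecreto))
--     enSecreto = sum(c in numSecreto for c in conjetura)
--     pico = enSecreto - fermi
--     if fermi == 0 and pico == 0:
--         return 'Panecillos'
--     return ' '.join(['Fermi'] * fermi + ['Pico'] * pico)
-- ===== Notes on version B (the rewrite author's own statement) =====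
-- stated objective: alternative
-- what changed: Replaces the per-index branch-and-sort loop with two independent whole-string aggregations (zip-equality count for Fermi, membership count over the guess) and derives Pico arithmetically as their difference, assembling the answer as ['Fermi']*f + ['Pico']*p without any sort or per-index branching.
import Mathlib
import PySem

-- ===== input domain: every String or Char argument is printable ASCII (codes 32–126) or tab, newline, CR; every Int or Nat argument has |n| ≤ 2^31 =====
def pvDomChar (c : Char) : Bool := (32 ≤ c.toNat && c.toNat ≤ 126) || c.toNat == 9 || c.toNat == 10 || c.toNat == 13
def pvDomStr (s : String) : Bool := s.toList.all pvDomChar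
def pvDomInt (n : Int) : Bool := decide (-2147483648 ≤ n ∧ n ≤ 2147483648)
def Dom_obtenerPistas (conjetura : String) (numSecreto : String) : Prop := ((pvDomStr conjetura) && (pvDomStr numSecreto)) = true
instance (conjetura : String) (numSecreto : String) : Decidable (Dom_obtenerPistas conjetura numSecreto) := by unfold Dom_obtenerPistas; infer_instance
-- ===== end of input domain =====

-- B replaces A's per-index branch-and-sort loop by two whole-string aggregations (zip-equality sum, membership sum) and derives Pico by subtraction; return values proved equal wherever A returns.

-- ===== PORT A =====
def obtenerPistas (conjetura : String) (numSecreto : String) : String :=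
  if conjetura = numSecreto then "¡Lo has adivinado!"
  else
    let cs := conjetura.toList
    let ns := numSecreto.toList
    let pista :=
      (PySem.List.pyRange 0 (PySem.List.len cs) 1).foldl
        (fun (acc : List String) i =>
          if PySem.List.pyGetD cs i ' ' = PySem.List.pyGetD ns i ' ' then
            acc ++ ["Fermi"]
          else if PySem.Chars.isIn [PySem.List.pyGetD cs i ' '] ns then
            acc ++ ["Pico"]
          else acc) []
    if pista.length = 0 then "Panecillos"
    else PySem.Str.join " " (PySem.List.sorted pista (fun x => x) false)

-- ===== PORT B =====
def obtenerPistas_alt (conjetura : String) (numSecreto : String) : String :=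
  if conjetura = numSecreto then "¡Lo has adivinado!"
  else
    let cs := conjetura.toList
    let ns := numSecreto.toList
    let fermi : Int :=
      ((cs.zip ns).map (fun pr => if pr.1 = pr.2 then (1 : Int) else 0)).sum
    let enSecreto : Int :=
      (cs.map (fun c => if PySem.Chars.isIn [c] ns then (1 : Int) else 0)).sum
    let pico := enSecreto - fermi
    if fermi = 0 ∧ pico = 0 then "Panecillos"
    else PySem.Str.join " "
      (List.replicate fermi.toNat "Fermi" ++ List.replicate pico.toNat "Pico")

-- ===== PRECONDITION & SPEC =====
-- Pre_ excludes exactly the inputs where A raises IndexError: an unequal guess longer than the secret.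
def Pre_obtenerPistas (conjetura : String) (numSecreto : String) : Prop :=
  conjetura.toList.length ≤ numSecreto.toList.length
instance (conjetura : String) (numSecreto : String) : Decidable (Pre_obtenerPistas conjetura numSecreto) := by unfold Pre_obtenerPistas; infer_instance

def pvWitness_obtenerPistas : String × String := ("123", "143")

def Spec_obtenerPistas (conjetura : String) (numSecreto : String) (out : String) : Prop := out = obtenerPistas_alt conjetura numSecreto
instance (conjetura : String) (numSecreto : String) (out : String) : Decidable (Spec_obtenerPistas conjetura numSecreto out) := by unfold Spec_obtenerPistas; infer_instance

-- ===== CLAIM (what is proved, stated in full; the proofs are below) =====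
def Claim_equal_obtenerPistas : Prop := ∀ (conjetura : String) (numSecreto : String), Dom_obtenerPistas conjetura numSecreto → Pre_obtenerPistas conjetura numSecreto → Spec_obtenerPistas conjetura numSecreto (obtenerPistas conjetura numSecreto)

-- ===== LEMMAS AND PROOFS =====

-- A's loop over any list, as a flatMap.
theorem pista_eq_flatMap {α : Type} (p q : α → Bool) (l : List α) (acc : List String) :
    l.foldl (fun acc x =>
        if p x = true then acc ++ ["Fermi"]
        else if q x = true then acc ++ ["Pico"] else acc) acc
      = acc ++ l.flatMap (fun x =>
          if p x then ["Fermi"] else if q x then ["Pico"] else []) := by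
  have h : (fun (acc : List String) x =>
        if p x = true then acc ++ ["Fermi"]
        else if q x = true then acc ++ ["Pico"] else acc)
      = (fun acc x => acc ++
          (if p x then ["Fermi"] else if q x then ["Pico"] else [])) := by
    funext acc x; split_ifs <;> simp
  rw [h, PySem.List.foldl_append_eq_flatMap]

theorem count_flatMap {α : Type} (p q : α → Bool) (l : List α) (a : String) :
    (l.flatMap (fun x =>
        if p x then ["Fermi"] else if q x then ["Pico"] else [])).count a
      = (if a = "Fermi" then l.countP p
         else if a = "Pico" then l.countP (fun x => !p x && q x) else 0) := by
  induction l with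
  | nil => simp
  | cons x t ih =>
      simp only [List.flatMap_cons, List.count_append, List.countP_cons, ih]
      by_cases hp : p x
      · by_cases ha : a = "Fermi"
        · subst ha; simp [hp]; omega
        · simp [hp, ha, Ne.symm ha]
      · by_cases hq : q x
        · by_cases ha : a = "Pico"
          · subst ha; simp [hp, hq]; omega
          · simp [hp, hq, ha, Ne.symm ha]
        · simp [hp, hq]

theorem sorted_flatMap_eq_replicate {α : Type} (p q : α → Bool) (l : List α) :
    PySem.List.sorted (l.flatMap (fun x =>
        if p x then ["Fermi"] else if q x then ["Pico"] else [])) (fun x => x) false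
      = List.replicate (l.countP p) "Fermi"
          ++ List.replicate (l.countP (fun x => !p x && q x)) "Pico" := by
  set xs := l.flatMap (fun x =>
      if p x then ["Fermi"] else if q x then ["Pico"] else []) with hxs
  have hperm : xs.Perm (List.replicate (l.countP p) "Fermi"
      ++ List.replicate (l.countP (fun x => !p x && q x)) "Pico") := by
    rw [List.perm_iff_count]
    intro a
    rw [hxs, count_flatMap p q l a]
    simp only [List.count_append, List.count_replicate]
    by_cases h1 : a = "Fermi"
    · subst h1; simp
    · by_cases h2 : a = "Pico"
      · subst h2; simp
      · simp [h1, h2, Ne.symm h1, Ne.symm h2]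
  apply PySem.List.eq_of_perm_of_pairwise_le_of_injective (key := fun x : String => x)
      (fun _ _ h => h)
  · exact (PySem.List.sorted_perm xs (fun x => x) false).trans hperm
  · exact PySem.List.sorted_pairwise xs (fun x => x)
  · rw [List.pairwise_append]
    refine ⟨List.pairwise_replicate.mpr (by simp), List.pairwise_replicate.mpr (by simp), ?_⟩
    intro a ha b hb
    rw [List.eq_of_mem_replicate ha, List.eq_of_mem_replicate hb,
      String.le_iff_toList_le]
    decide

-- Splitting a count along an implication p → q valid on the list's members.
theorem countP_split {α : Type} (p q : α → Bool) (l : List α)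
    (h : ∀ x ∈ l, p x = true → q x = true) :
    l.countP q = l.countP p + l.countP (fun x => !p x && q x) := by
  induction l with
  | nil => simp
  | cons x t ih =>
      have ht : ∀ y ∈ t, p y = true → q y = true := fun y hy => h y (by simp [hy])
      simp only [List.countP_cons]
      by_cases hp : p x
      · have hq : q x = true := h x (by simp) hp
        simp [hp, hq, ih ht]; omega
      · by_cases hq : q x
        · simp [hp, hq, ih ht]; omega
        · simp [hp, hq, ih ht]

-- ===== VERDICT (by name: the statement is the Claim_ definition above) =====
theorem obtenerPistas_spec : Claim_equal_obtenerPistas := by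
  unfold Claim_equal_obtenerPistas Spec_obtenerPistas
  intro conjetura numSecreto _ hpre
  unfold Pre_obtenerPistas at hpre
  unfold obtenerPistas obtenerPistas_alt
  by_cases heq : conjetura = numSecreto
  · simp [heq]
  · simp only [heq, if_false]
    set cs := conjetura.toList with hcs
    set ns := numSecreto.toList with hns
    set zs := cs.zip ns with hzs
    have hlzs : zs.length = cs.length := by
      rw [hzs, List.length_zip]; omega
    set p : Char × Char → Bool := fun pr => decide (pr.1 = pr.2) with hp
    set q : Char × Char → Bool := fun pr => PySem.Chars.isIn [pr.1] ns with hq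
    -- A's index loop is the same fold over the zipped pairs
    have hloop : (PySem.List.pyRange 0 (PySem.List.len cs) 1).foldl
        (fun (acc : List String) i =>
          if PySem.List.pyGetD cs i ' ' = PySem.List.pyGetD ns i ' ' then acc ++ ["Fermi"]
          else if PySem.Chars.isIn [PySem.List.pyGetD cs i ' '] ns then acc ++ ["Pico"]
          else acc) []
        = zs.foldl (fun (acc : List String) pr =>
            if p pr = true then acc ++ ["Fermi"]
            else if q pr = true then acc ++ ["Pico"] else acc) [] := by
      have hlen : PySem.List.len cs = PySem.List.len zs := by
        simp [PySem.List.len_eq, hlzs]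
      rw [hlen]
      refine Eq.trans (PySem.List.foldl_congr_mem _ _
        (fun (acc : List String) i =>
          if p (PySem.List.pyGetD zs i (' ', ' ')) = true then acc ++ ["Fermi"]
          else if q (PySem.List.pyGetD zs i (' ', ' ')) = true then acc ++ ["Pico"]
          else acc) [] ?_)
        (PySem.List.foldl_pyRange_zero_pyGetD zs (' ', ' ')
          (fun acc pr => if p pr = true then acc ++ ["Fermi"]
            else if q pr = true then acc ++ ["Pico"] else acc) [])
      intro acc i hi
      rw [PySem.List.mem_pyRange_one] at hi
      simp only [PySem.List.len_eq] at hi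
      have h1 : i.toNat < zs.length := by omega
      have e1 : PySem.List.pyGetD zs i (' ', ' ') = zs[i.toNat] :=
        PySem.List.pyGetD_eq_getElem zs (' ', ' ') (by omega) (by exact_mod_cast hi.2)
      have e2 : PySem.List.pyGetD cs i ' ' = cs[i.toNat]'(by omega) :=
        PySem.List.pyGetD_eq_getElem cs ' ' (by omega) (by omega)
      have e3 : PySem.List.pyGetD ns i ' ' = ns[i.toNat]'(by omega) :=
        PySem.List.pyGetD_eq_getElem ns ' ' (by omega) (by omega)
      have ez : zs[i.toNat] = (cs[i.toNat]'(by omega), ns[i.toNat]'(by omega)) :=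
        List.getElem_zip (h := h1)
      simp only [e1, e2, e3, ez, hp, hq, decide_eq_true_eq]
    rw [hloop, pista_eq_flatMap p q zs [], List.nil_append]
    -- B's two sums are counts over zs
    have hfermi : ((cs.zip ns).map (fun pr => if pr.1 = pr.2 then (1 : Int) else 0)).sum
        = (zs.countP p : Int) := by
      rw [← hzs, hp]
      simpa using PySem.List.sum_map_ite_one_zero (fun pr : Char × Char => decide (pr.1 = pr.2)) zs
    have hmem : ∀ x ∈ zs, p x = true → q x = true := by
      intro x hx hpx
      rw [hp] at hpx; rw [hq]
      have hxin : x.2 ∈ ns := List.of_mem_zip (by rw [← hzs]; exact hx) |>.2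
      have : x.1 = x.2 := by simpa using hpx
      rw [PySem.Chars.isIn_iff_infix]
      exact (List.singleton_infix_iff x.1 ns).mpr (this ▸ hxin)
    have hsec : (cs.map (fun c => if PySem.Chars.isIn [c] ns then (1 : Int) else 0)).sum
        = (zs.countP q : Int) := by
      have hfst : List.map Prod.fst zs = cs := by
        rw [hzs]; exact List.map_fst_zip hpre
      rw [← hfst, List.map_map, hq]
      simpa [Function.comp] using PySem.List.sum_map_ite_one_zero
        (fun pr : Char × Char => PySem.Chars.isIn [pr.1] ns) zs
    rw [hfermi, hsec]
    have hcount := countP_split p q zs hmem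
    set cp := zs.countP p with hcp
    set cr := zs.countP (fun x => !p x && q x) with hcr
    have hlenf : (zs.flatMap (fun x =>
        if p x then ["Fermi"] else if q x then ["Pico"] else [])).length = cp + cr := by
      have := congrArg List.length (sorted_flatMap_eq_replicate p q zs)
      rw [PySem.List.length_sorted] at this
      simpa [hcp, hcr] using this
    rw [hlenf, sorted_flatMap_eq_replicate p q zs, hcount]
    by_cases hz : cp + cr = 0
    · rw [if_pos hz, if_pos ⟨by exact_mod_cast (by omega : cp = 0), by push_cast; omega⟩]
    · have hB : ¬(((cp : Int)) = 0 ∧ ((cp + cr : Nat) : Int) - (cp : Int) = 0) := by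
        push_cast; omega
      rw [if_neg hz, if_neg hB]
      have e1 : ((cp : Int)).toNat = cp := by omega
      have e2 : (((cp + cr : Nat) : Int) - (cp : Int)).toNat = cr := by push_cast; omega
      rw [e1, e2]
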